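-- pv_equiv track=rewrite | github.com/CodingThrust/problem-reductions | docs/paper/verify-reductions/verify_partition_into_cliques_minimum_covering_by_cliques.py | is_valid_clique_partition
-- ===== SOURCE A (Python) =====
-- def is_valid_clique_partition(n, edges, k, config):
--     """Check if config is a valid partition into <= k cliques.
--
--     config: list of length n, config[v] = group index in [0, k).
--     Each group must form a clique (all pairs adjacent).
--     Every edge must have both endpoints in the same group.
--     """
--     if len(config) != n:
--         return False
--     if any(c < 0 or c >= k for c in config):
--         return False
--     edge_set = set()
--     for u, v in edges:
--         edge_set.add((min(u, v), max(u, v)))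
--     # Check each group is a clique
--     for group in range(k):
--         members = [v for v in range(n) if config[v] == group]
--         for i in range(len(members)):
--             for j in range(i + 1, len(members)):
--                 a, b = min(members[i], members[j]), max(members[i], members[j])
--                 if (a, b) not in edge_set:
--                     return False
--     # Check every edge is covered (both endpoints in same group)
--     for u, v in edges:
--         if config[u] != config[v]:
--             return False
--     return True
-- ===== SOURCE B (Python) =====
-- def is_valid_clique_partition(n, edges, k, config):
--     """Check if config is a valid partition into <= k cliques.
--
--     One pass over config groups the vertices by their group label
--     (instead of scanning range(n) once per group in range(k)), then
--     each group's member list is pair-checked against the edge set.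
--     """
--     if len(config) != n:
--         return False
--     if any(not (0 <= c < k) for c in config):
--         return False
--     groups = {}
--     for v, c in enumerate(config):
--         groups.setdefault(c, []).append(v)
--     edge_set = {(min(u, v), max(u, v)) for u, v in edges}
--     for members in groups.values():
--         for i, a in enumerate(members):
--             for b in members[i + 1:]:
--                 if (min(a, b), max(a, b)) not in edge_set:
--                     return False
--     return all(config[u] == config[v] for u, v in edges)
-- ===== Notes on version B (the rewrite author's own statement) =====
-- stated objective: alternative
-- what changed: B groups vertices by their label in one pass over config (dict of group -> member list) instead of scanning range(n) once for every group in range(k), builds the edge set as a comprehension, and checks edge coverage with all(); pair-checking each group's members against the edge set is kept.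
-- outside the precondition, e.g. on is_valid_clique_partition(2, [(0, 5)], 1, [0, 0]): A returns False, B returns False
import Mathlib
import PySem

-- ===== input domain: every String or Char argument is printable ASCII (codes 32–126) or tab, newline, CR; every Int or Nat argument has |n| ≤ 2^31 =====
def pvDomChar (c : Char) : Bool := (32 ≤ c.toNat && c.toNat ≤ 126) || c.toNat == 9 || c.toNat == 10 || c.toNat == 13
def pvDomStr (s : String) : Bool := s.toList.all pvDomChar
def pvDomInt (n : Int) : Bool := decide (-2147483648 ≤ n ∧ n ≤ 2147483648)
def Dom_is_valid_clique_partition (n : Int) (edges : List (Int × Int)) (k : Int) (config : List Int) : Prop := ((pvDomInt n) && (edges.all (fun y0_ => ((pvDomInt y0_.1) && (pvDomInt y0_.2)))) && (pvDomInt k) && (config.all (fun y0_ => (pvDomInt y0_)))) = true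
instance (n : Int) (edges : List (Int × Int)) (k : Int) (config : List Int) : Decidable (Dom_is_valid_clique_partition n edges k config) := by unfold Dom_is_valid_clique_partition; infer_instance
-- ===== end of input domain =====

-- B replaces A's per-group scan of range(n) for every group in range(k) by a single grouping
-- pass over config (dict group -> members); the per-group pair check against the edge set and
-- the edge-coverage check are kept. Equivalence is proved on all inputs where A returns.


-- ===== PORT A =====
-- A-side helpers: the members comprehension '[v for v in range(n) if config[v] == group]'
-- and the nested index loops checking all member pairs against the edge set.
def pvMembersA (n : Int) (config : List Int) (g : Int) : List Int :=
  (PySem.List.pyRange 0 n).filter (fun v => PySem.List.pyGetD config v 0 == g)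

def pvPairLoopA (es : PySem.Set (Int × Int)) (m : List Int) : Bool :=
  (PySem.List.pyRange 0 (m.length : Int)).any (fun i =>
    (PySem.List.pyRange (i + 1) (m.length : Int)).any (fun j =>
      let a := min (PySem.List.pyGetD m i 0) (PySem.List.pyGetD m j 0)
      let b := max (PySem.List.pyGetD m i 0) (PySem.List.pyGetD m j 0)
      !(PySem.Set.contains es (a, b))))

def is_valid_clique_partition (n : Int) (edges : List (Int × Int)) (k : Int) (config : List Int) : Bool :=
  if (config.length : Int) ≠ n then false
  else if config.any (fun c => decide (c < 0) || decide (k ≤ c)) then false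
  else if (PySem.List.pyRange 0 k).any (fun g =>
      pvPairLoopA (edges.foldl (fun s e => PySem.Set.add s (min e.1 e.2, max e.1 e.2)) PySem.Set.empty)
        (pvMembersA n config g)) then false
  else !(edges.any (fun e => PySem.List.pyGetD config e.1 0 != PySem.List.pyGetD config e.2 0))

-- ===== PORT B =====
-- B-side helpers: the one-pass grouping loop 'groups.setdefault(c, []).append(v)' and the
-- pair check of one member list ('for i, a in enumerate(members): for b in members[i+1:]').
def pvGroupsB (config : List Int) : PySem.Dict Int (List Int) :=
  (PySem.List.enumerate config).foldl
    (fun d p => d.modify p.2 [] (fun ms => ms ++ [p.1])) PySem.Dict.empty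

def pvPairLoopB (es : PySem.Set (Int × Int)) (m : List Int) : Bool :=
  (PySem.List.enumerate m).any (fun ia =>
    (PySem.List.slice m (some (ia.1 + 1)) none).any (fun b =>
      !(PySem.Set.contains es (min ia.2 b, max ia.2 b))))

def is_valid_clique_partition_alt (n : Int) (edges : List (Int × Int)) (k : Int) (config : List Int) : Bool :=
  if (config.length : Int) ≠ n then false
  else if config.any (fun c => !(decide (0 ≤ c) && decide (c < k))) then false
  else if (pvGroupsB config).values.any (fun m =>
      pvPairLoopB (PySem.Set.ofList (edges.map (fun e => (min e.1 e.2, max e.1 e.2)))) m) then false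
  else edges.all (fun e => PySem.List.pyGetD config e.1 0 == PySem.List.pyGetD config e.2 0)

-- ===== PRECONDITION & SPEC =====
-- Pre_ excludes inputs on which the coverage loop 'config[u] != config[v]' indexes out of
-- range (endpoint outside [-n, n) while the length/range checks passed): there Python A
-- raises IndexError whenever the clique check passes; when the clique check fails first,
-- A (and B alike) returns False — those excluded inputs are the ones cited in the claim.
def Pre_is_valid_clique_partition (n : Int) (edges : List (Int × Int)) (k : Int) (config : List Int) : Prop :=
  ((config.length : Int) = n ∧ ∀ c ∈ config, 0 ≤ c ∧ c < k) →
    ∀ e ∈ edges, -n ≤ e.1 ∧ e.1 < n ∧ -n ≤ e.2 ∧ e.2 < n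
instance (n : Int) (edges : List (Int × Int)) (k : Int) (config : List Int) : Decidable (Pre_is_valid_clique_partition n edges k config) := by unfold Pre_is_valid_clique_partition; infer_instance

def pvWitness_is_valid_clique_partition : Int × (List (Int × Int)) × Int × List Int :=
  (3, [(0, 1), (1, 2), (0, 2)], 2, [0, 0, 0])

def Spec_is_valid_clique_partition (n : Int) (edges : List (Int × Int)) (k : Int) (config : List Int) (out : Bool) : Prop := out = is_valid_clique_partition_alt n edges k config
instance (n : Int) (edges : List (Int × Int)) (k : Int) (config : List Int) (out : Bool) : Decidable (Spec_is_valid_clique_partition n edges k config out) := by unfold Spec_is_valid_clique_partition; infer_instance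

-- ===== CLAIM (what is proved, stated in full; the proofs are below) =====
def Claim_equal_is_valid_clique_partition : Prop := ∀ (n : Int) (edges : List (Int × Int)) (k : Int) (config : List Int), Dom_is_valid_clique_partition n edges k config → Pre_is_valid_clique_partition n edges k config → Spec_is_valid_clique_partition n edges k config (is_valid_clique_partition n edges k config)

-- ===== LEMMAS AND PROOFS =====

-- the two range-check predicates agree pointwise
theorem pv_pred_eq (k c : Int) :
    (decide (c < 0) || decide (k ≤ c)) = !(decide (0 ≤ c) && decide (c < k)) := by
  by_cases h : c < 0 <;> by_cases h' : k ≤ c <;> simp [h, h'] <;> omega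

-- the two edge-set builds are the same set
theorem pv_edge_set_eq (edges : List (Int × Int)) :
    edges.foldl (fun s e => PySem.Set.add s (min e.1 e.2, max e.1 e.2)) PySem.Set.empty
      = PySem.Set.ofList (edges.map (fun e => (min e.1 e.2, max e.1 e.2))) := by
  rw [PySem.Set.ofList_eq_foldl, List.foldl_map]
  rfl

-- both pair loops test exactly the member pairs at positions p < q
theorem pv_pair_loop_eq (es : PySem.Set (Int × Int)) (m : List Int) :
    pvPairLoopA es m = pvPairLoopB es m := by
  unfold pvPairLoopA pvPairLoopB
  rw [Bool.eq_iff_iff, List.any_eq_true, List.any_eq_true]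
  constructor
  · rintro ⟨i, hi, hin⟩
    rw [List.any_eq_true] at hin
    obtain ⟨j, hj, hbad⟩ := hin
    rw [PySem.List.mem_pyRange_one] at hi hj
    have hilen : i.toNat < m.length := by omega
    have hjlen : j.toNat < m.length := by omega
    refine ⟨(i, m[i.toNat]), ?_, ?_⟩
    · rw [PySem.List.mem_enumerate_iff]
      exact ⟨i.toNat, hilen, by rw [Prod.ext_iff]; constructor <;> simp <;> omega⟩
    · rw [List.any_eq_true]
      refine ⟨m[j.toNat], ?_, ?_⟩
      · rw [PySem.List.slice_from m (by omega : (0:Int) ≤ i + 1)]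
        rw [List.mem_iff_getElem]
        refine ⟨j.toNat - (i + 1).toNat, by simp; omega, ?_⟩
        rw [List.getElem_drop]
        congr 1
        omega
      · rw [PySem.List.pyGetD_eq_getElem m 0 hi.1 hi.2,
            PySem.List.pyGetD_eq_getElem m 0 (by omega) hj.2] at hbad
        exact hbad
  · rintro ⟨p, hp, hin⟩
    rw [PySem.List.mem_enumerate_iff] at hp
    obtain ⟨a, ha, rfl⟩ := hp
    rw [List.any_eq_true] at hin
    obtain ⟨b, hb, hbad⟩ := hin
    rw [PySem.List.slice_from m (by omega : (0:Int) ≤ (0 + (a:Int)) + 1)] at hb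
    rw [List.mem_iff_getElem] at hb
    obtain ⟨t, ht, rfl⟩ := hb
    have hlen : ((0 + (a:Int)) + 1).toNat = a + 1 := by omega
    have htlen : t < m.length - (a + 1) := by
      simpa [hlen] using ht
    refine ⟨(a : Int), PySem.List.mem_pyRange_one.mpr ⟨by omega, by omega⟩, ?_⟩
    rw [List.any_eq_true]
    refine ⟨((a : Int) + 1 + (t : Int)), PySem.List.mem_pyRange_one.mpr ⟨by omega, by omega⟩, ?_⟩
    rw [PySem.List.pyGetD_eq_getElem m 0 (by omega) (by omega),
        PySem.List.pyGetD_eq_getElem m 0 (by omega) (by omega)]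
    rw [List.getElem_drop] at hbad
    have h2 : ((a:Int)).toNat = a := by omega
    have h3 : ((a:Int) + 1 + (t:Int)).toNat = ((0 + (a:Int)) + 1).toNat + t := by omega
    simp only [h2, h3]
    exact hbad

-- B's grouping dict looked up at g is A's members comprehension (with n = len(config))
theorem pv_groups_getD (config : List Int) (g : Int) :
    (pvGroupsB config).getD g [] = pvMembersA (config.length : Int) config g := by
  unfold pvGroupsB pvMembersA
  rw [show (PySem.List.enumerate config).foldl
        (fun d p => d.modify p.2 [] (fun ms => ms ++ [p.1])) PySem.Dict.empty
      = ((PySem.List.enumerate config).map Prod.swap).foldl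
        (fun d q => d.modify q.1 [] (fun ms => ms ++ [q.2])) PySem.Dict.empty
    from (List.foldl_map (f := Prod.swap)
        (g := fun d q => PySem.Dict.modify d q.1 [] (fun ms => ms ++ [q.2]))).symm]
  rw [PySem.Dict.getD_foldl_modify_append]
  rw [PySem.List.enumerate_eq_map_pyRange config 0]
  simp only [PySem.Dict.getD_empty, List.nil_append, List.map_map, List.filter_map,
    Function.comp_def, Prod.swap_prod_mk]
  simp [PySem.List.len]

theorem pv_groups_keys (config : List Int) :
    (pvGroupsB config).keys = PySem.Set.ofList config := by
  unfold pvGroupsB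
  rw [show (fun (d : PySem.Dict Int (List Int)) (p : Int × Int) => d.modify p.2 [] (fun ms => ms ++ [p.1]))
      = (fun d p => d.modify ((fun q : Int × Int => q.2) p) [] ((fun (_ : PySem.Dict Int (List Int)) (p : Int × Int) => (fun ms => ms ++ [p.1])) d p)) from rfl]
  rw [PySem.Dict.keys_foldl_modify_key]
  rw [PySem.Dict.keys_empty, PySem.List.map_snd_enumerate]
  rw [PySem.Set.ofList_eq_foldl]
  rfl

-- a label that occurs nowhere in config has an empty members list
theorem pv_members_nil (config : List Int) (g : Int) (hg : g ∉ config) :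
    pvMembersA (config.length : Int) config g = [] := by
  unfold pvMembersA
  rw [List.filter_eq_nil_iff]
  intro v hv
  rw [PySem.List.mem_pyRange_one] at hv
  rw [PySem.List.pyGetD_eq_getElem config 0 hv.1 hv.2]
  simp only [beq_iff_eq]
  intro he
  exact hg (he ▸ List.getElem_mem _)

theorem pv_pair_loop_nil (es : PySem.Set (Int × Int)) : pvPairLoopB es [] = false := by
  rfl

-- the clique checks agree once every label of config lies in [0, k)
theorem pv_clique_eq (k : Int) (config : List Int) (es : PySem.Set (Int × Int))
    (hrange : ∀ c ∈ config, 0 ≤ c ∧ c < k) :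
    (PySem.List.pyRange 0 k).any
        (fun g => pvPairLoopA es (pvMembersA (config.length : Int) config g))
      = (pvGroupsB config).values.any (fun m => pvPairLoopB es m) := by
  have hnodup : (pvGroupsB config).keys.Nodup := by
    rw [pv_groups_keys]; exact PySem.Set.nodup_ofList config
  have hvals := PySem.Dict.values_eq_map_keys (pvGroupsB config) hnodup []
  rw [Bool.eq_iff_iff, List.any_eq_true, List.any_eq_true]
  constructor
  · rintro ⟨g, hg, hF⟩
    rw [pv_pair_loop_eq] at hF
    have hgc : g ∈ config := by
      by_contra hnc
      rw [pv_members_nil config g hnc, pv_pair_loop_nil] at hF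
      exact absurd hF (by simp)
    refine ⟨(pvGroupsB config).getD g [], ?_, ?_⟩
    · rw [hvals]
      exact List.mem_map.mpr ⟨g, by
        rw [pv_groups_keys]
        exact (PySem.Set.mem_ofList config g).mpr hgc, rfl⟩
    · rw [pv_groups_getD]
      exact hF
  · rintro ⟨m, hm, hF⟩
    rw [hvals] at hm
    obtain ⟨g, hgk, rfl⟩ := List.mem_map.mp hm
    have hgc : g ∈ config := (PySem.Set.mem_ofList config g).mp (by rwa [pv_groups_keys] at hgk)
    obtain ⟨h0, h1⟩ := hrange g hgc
    refine ⟨g, PySem.List.mem_pyRange_one.mpr ⟨h0, h1⟩, ?_⟩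
    rw [pv_pair_loop_eq, ← pv_groups_getD]
    exact hF

theorem pv_cover_eq (edges : List (Int × Int)) (config : List Int) :
    (!(edges.any (fun e => PySem.List.pyGetD config e.1 0 != PySem.List.pyGetD config e.2 0)))
      = edges.all (fun e => PySem.List.pyGetD config e.1 0 == PySem.List.pyGetD config e.2 0) := by
  simp [List.all_eq_not_any_not, bne]

theorem pv_main (n : Int) (edges : List (Int × Int)) (k : Int) (config : List Int) :
    is_valid_clique_partition n edges k config = is_valid_clique_partition_alt n edges k config := by
  unfold is_valid_clique_partition is_valid_clique_partition_alt
  by_cases h1 : (config.length : Int) = n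
  · subst h1
    have hg2 : config.any (fun c => decide (c < 0) || decide (k ≤ c))
        = config.any (fun c => !(decide (0 ≤ c) && decide (c < k))) :=
      PySem.List.any_congr_mem (fun c _ => pv_pred_eq k c)
    by_cases h2 : config.any (fun c => !(decide (0 ≤ c) && decide (c < k))) = true
    · have hlen : ¬((config.length : Int) ≠ (config.length : Int)) := fun h => h rfl
      rw [if_neg hlen, if_neg hlen, if_pos (hg2.trans h2), if_pos h2]
    · have hb : config.any (fun c => !(decide (0 ≤ c) && decide (c < k))) = false :=
        Bool.eq_false_iff.mpr h2
      have hrange : ∀ c ∈ config, 0 ≤ c ∧ c < k := by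
        intro c hc
        have h := List.any_eq_false.mp hb c hc
        simpa using h
      rw [pv_edge_set_eq, pv_clique_eq k config
            (PySem.Set.ofList (edges.map (fun e => (min e.1 e.2, max e.1 e.2)))) hrange,
          pv_cover_eq, hg2]
  · rw [if_pos h1, if_pos h1]

-- ===== VERDICT (by name: the statement is the Claim_ definition above) =====
theorem is_valid_clique_partition_spec : Claim_equal_is_valid_clique_partition := by
  intro n edges k config _ _
  unfold Spec_is_valid_clique_partition
  exact pv_main n edges k config
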